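-- pv_equiv track=rewrite | github.com/liekevandenbiggelaar/EAFM | Code/Feature_Extraction/PQR_delineate.py | QRS_duration
-- ===== SOURCE A (Python) =====
-- def QRS_duration(Q: list, S: list, avg_RR: int):
--
--     # Find a good S peak for each Q peak
--     max_duration = avg_RR
--     QS = []
--
--     # Go over all Q-peaks
--     while len(Q) != 0 and len(S) != 0:
--         Q_i = Q[0]
--         S_i = S[0]
--         duration = S_i - Q_i
--
--         # Check if there is a S- for the Q-peak
--         if duration > max_duration:
--             Q.pop(0)
--
--         # Check if there is a Q- for the S-peak
--         elif duration < 0: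
--             S.pop(0)
--
--         # Otherwise it is a match!
--         else:
--             QS.append( duration )
--             Q.pop(0)
--             S.pop(0)
--
--     return QS
-- ===== SOURCE B (Python) =====
-- def QRS_duration(Q: list, S: list, avg_RR: int):
--     # Two-pointer scan: advance indices instead of popping from the front.
--     # Note: unlike the original, this does not consume (mutate) Q and S.
--     i = j = 0
--     n, m = len(Q), len(S)
--     QS = []
--     while i < n and j < m:
--         duration = S[j] - Q[i]
--         if duration > avg_RR:
--             i += 1
--         elif duration < 0:
--             j += 1
--         else:
--             QS.append(duration)
--             i += 1
--             j += 1
--     return QS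
-- ===== Notes on version B (the rewrite author's own statement) =====
-- stated objective: faster
-- what changed: Replaces the destructive while-loop with list.pop(0) (each pop shifts the whole list) by a single two-pointer index scan over unmodified lists.
import Mathlib
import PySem

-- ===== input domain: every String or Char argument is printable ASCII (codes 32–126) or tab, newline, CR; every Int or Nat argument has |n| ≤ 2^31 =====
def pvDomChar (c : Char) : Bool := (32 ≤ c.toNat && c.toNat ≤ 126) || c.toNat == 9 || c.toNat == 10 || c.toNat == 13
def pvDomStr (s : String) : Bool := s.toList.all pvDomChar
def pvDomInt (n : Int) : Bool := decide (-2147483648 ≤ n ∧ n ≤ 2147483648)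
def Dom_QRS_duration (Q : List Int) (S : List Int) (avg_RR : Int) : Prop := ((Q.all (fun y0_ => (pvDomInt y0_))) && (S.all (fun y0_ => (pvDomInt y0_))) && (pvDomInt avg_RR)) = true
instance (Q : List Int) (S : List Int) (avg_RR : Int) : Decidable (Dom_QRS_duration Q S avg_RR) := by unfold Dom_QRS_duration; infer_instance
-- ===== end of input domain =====

-- B replaces A's destructive pop(0) loop by a two-pointer index scan (faster in a timing run);
-- A mutates its Q and S arguments in place while B does not — the equivalence proved here is about the return value only.

-- ===== PORT A =====
-- the while loop of A: pop heads of Q and S until one is empty, appending matches to QS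
def pvALoop (Q : List Int) (S : List Int) (avg_RR : Int) (QS : List Int) : List Int :=
  match Q, S with
  | q :: Qt, s :: St =>
    let duration := s - q
    if duration > avg_RR then
      pvALoop Qt (s :: St) avg_RR QS
    else if duration < 0 then
      pvALoop (q :: Qt) St avg_RR QS
    else
      pvALoop Qt St avg_RR (QS ++ [duration])
  | _, _ => QS
termination_by Q.length + S.length
decreasing_by all_goals (simp only [List.length_cons]; omega)

def QRS_duration (Q : List Int) (S : List Int) (avg_RR : Int) : List Int :=
  pvALoop Q S avg_RR []

-- ===== PORT B =====
-- B's while loop: indices i, j advance over the unmodified lists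
def pvBLoop (Q : List Int) (S : List Int) (avg_RR : Int) (i j : Nat) (QS : List Int) : List Int :=
  if h : i < Q.length ∧ j < S.length then
    let duration := S[j]'h.2 - Q[i]'h.1
    if duration > avg_RR then
      pvBLoop Q S avg_RR (i + 1) j QS
    else if duration < 0 then
      pvBLoop Q S avg_RR i (j + 1) QS
    else
      pvBLoop Q S avg_RR (i + 1) (j + 1) (QS ++ [duration])
  else QS
termination_by (Q.length - i) + (S.length - j)
decreasing_by all_goals omega

def QRS_duration_alt (Q : List Int) (S : List Int) (avg_RR : Int) : List Int :=
  pvBLoop Q S avg_RR 0 0 []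

-- ===== PRECONDITION & SPEC =====
def Spec_QRS_duration (Q : List Int) (S : List Int) (avg_RR : Int) (out : List Int) : Prop := out = QRS_duration_alt Q S avg_RR
instance (Q : List Int) (S : List Int) (avg_RR : Int) (out : List Int) : Decidable (Spec_QRS_duration Q S avg_RR out) := by unfold Spec_QRS_duration; infer_instance

-- ===== CLAIM (what is proved, stated in full; the proofs are below) =====
def Claim_equal_QRS_duration : Prop := ∀ (Q : List Int) (S : List Int) (avg_RR : Int), Dom_QRS_duration Q S avg_RR → Spec_QRS_duration Q S avg_RR (QRS_duration Q S avg_RR)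

-- ===== LEMMAS AND PROOFS =====

-- the two-pointer loop at (i, j) computes what A's loop computes on the suffixes Q.drop i, S.drop j
theorem pvBLoop_eq_pvALoop_drop (Q S : List Int) (avg_RR : Int) (i j : Nat) (QS : List Int) :
    pvBLoop Q S avg_RR i j QS = pvALoop (Q.drop i) (S.drop j) avg_RR QS := by
  fun_induction pvBLoop Q S avg_RR i j QS with
  | case1 i j QS h d hgt ih =>
    rw [ih]
    rw [List.drop_eq_getElem_cons h.1, List.drop_eq_getElem_cons h.2, pvALoop]
    rw [if_pos hgt]
  | case2 i j QS h d hgt hlt ih =>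
    rw [ih]
    rw [List.drop_eq_getElem_cons h.1, List.drop_eq_getElem_cons h.2, pvALoop]
    rw [if_neg hgt, if_pos hlt]
  | case3 i j QS h d hgt hlt ih =>
    rw [ih]
    rw [List.drop_eq_getElem_cons h.1, List.drop_eq_getElem_cons h.2, pvALoop]
    rw [if_neg hgt, if_neg hlt]
  | case4 i j QS h =>
    have hnil : Q.drop i = [] ∨ S.drop j = [] := by
      rw [List.drop_eq_nil_iff, List.drop_eq_nil_iff]; omega
    rcases hnil with h' | h'
    · rw [h', pvALoop.eq_def]
    · rw [h', pvALoop.eq_def]; cases Q.drop i <;> rfl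

-- ===== VERDICT (by name: the statement is the Claim_ definition above) =====
theorem QRS_duration_spec : Claim_equal_QRS_duration := by
  intro Q S avg_RR _
  unfold Spec_QRS_duration QRS_duration QRS_duration_alt
  rw [pvBLoop_eq_pvALoop_drop]
  simp
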